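-- pv_equiv track=rewrite | github.com/IronAdamant/PythonBol-Translator | src/cobol_safe_translator/procedure_parser.py | _split_operands
-- ===== SOURCE A (Python) =====
-- def _split_operands(text: str) -> list[str]:
--     """Split operand text into tokens, preserving quoted strings as single tokens.
--
--     Reference modifications like ``WS-FIELD(1:3)`` and subscripts like
--     ``WS-TABLE(IDX)`` are kept as single tokens. Standalone parentheses in
--     COMPUTE expressions are split into separate tokens.
--     """
--     tokens: list[str] = []
--     current = ""
--     in_quote: str | None = None
--     paren_depth = 0
--
--     for ch in text:
--         if in_quote:
--             current += ch
--             if ch == in_quote: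
--                 in_quote = None
--         elif ch in ('"', "'"):
--             in_quote = ch
--             current += ch
--         elif ch in (" ", "\t"):
--             if paren_depth > 0:
--                 # Inside parens attached to a name — keep as part of token
--                 current += ch
--             else:
--                 if current:
--                     tokens.append(current)
--                     current = ""
--         elif ch == "(":
--             if paren_depth > 0:
--                 # Already inside attached parens — keep nested ( as part of token
--                 current += ch
--                 paren_depth += 1
--             elif current and (current[-1].isalnum() or current[-1] in ("-", "_")):
--                 # Paren directly after an identifier — reference mod or subscript
--                 current += ch
--                 paren_depth += 1
--             else:
--                 # Standalone paren (COMPUTE expression)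
--                 if current:
--                     tokens.append(current)
--                     current = ""
--                 tokens.append(ch)
--         elif ch == ")":
--             if paren_depth > 0:
--                 current += ch
--                 paren_depth -= 1
--             else:
--                 if current:
--                     tokens.append(current)
--                     current = ""
--                 tokens.append(ch)
--         else:
--             current += ch
--
--     if current:
--         tokens.append(current)
--
--     # Post-process: split tokens where a closing quote is immediately followed
--     # by an identifier (e.g., 'ACCT ID : 'WS-KEY -> two tokens)
--     fixed: list[str] = []
--     for tok in tokens:
--         if len(tok) > 2 and (tok[0] in ('"', "'")) and tok[0] in tok[1:]:
--             # Find the closing quote position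
--             close_idx = tok.index(tok[0], 1)
--             if close_idx < len(tok) - 1:
--                 # There's content after the closing quote
--                 fixed.append(tok[:close_idx + 1])
--                 remainder = tok[close_idx + 1:]
--                 if remainder:
--                     fixed.append(remainder)
--             else:
--                 fixed.append(tok)
--         else:
--             fixed.append(tok)
--
--     # Post-process: merge hex/binary/national prefix with following quoted string
--     # e.g., X "FF" → X"FF", H'0F' → H'0F'
--     merged: list[str] = []
--     for tok in fixed:
--         if (merged and len(merged[-1]) == 1
--                 and merged[-1].upper() in ('X', 'B', 'Z', 'N', 'H')
--                 and tok and tok[0] in ('"', "'")):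
--             merged[-1] = merged[-1] + tok
--         else:
--             merged.append(tok)
--
--     return merged
-- ===== SOURCE B (Python) =====
-- def _split_operands(text: str) -> list[str]:
--     """One fused scan: tokens are emitted through an `emit` step that splits a
--     quoted literal from trailing content and merges X/B/Z/N/H prefixes inline,
--     replacing A's main loop plus its two post-processing passes."""
--     out: list[str] = []
--
--     def pieces(tok: str) -> list[str]:
--         if tok and tok[0] in ('"', "'"):
--             i = tok.find(tok[0], 1)
--             if 1 <= i < len(tok) - 1:
--                 return [tok[:i + 1], tok[i + 1:]]
--         return [tok]
--
--     def emit(tok: str) -> None: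
--         for piece in pieces(tok):
--             if (out and len(out[-1]) == 1 and out[-1].upper() in ('X', 'B', 'Z', 'N', 'H')
--                     and piece and piece[0] in ('"', "'")):
--                 out[-1] = out[-1] + piece
--             else:
--                 out.append(piece)
--
--     current = ""
--     in_quote = None
--     depth = 0
--     for ch in text:
--         if in_quote:
--             current += ch
--             if ch == in_quote:
--                 in_quote = None
--         elif ch in ('"', "'"):
--             in_quote = ch
--             current += ch
--         elif ch in (" ", "\t"):
--             if depth > 0:
--                 current += ch
--             elif current:
--                 emit(current)
--                 current = ""
--         elif ch == "(":
--             if depth > 0 or (current and (current[-1].isalnum() or current[-1] in ("-", "_"))):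
--                 current += ch
--                 depth += 1
--             else:
--                 if current:
--                     emit(current)
--                     current = ""
--                 emit(ch)
--         elif ch == ")":
--             if depth > 0:
--                 current += ch
--                 depth -= 1
--             else:
--                 if current:
--                     emit(current)
--                     current = ""
--                 emit(ch)
--         else:
--             current += ch
--     if current:
--         emit(current)
--     return out
-- ===== Notes on version B (the rewrite author's own statement) =====
-- stated objective: alternative
-- what changed: B fuses A's three passes (character scan building raw tokens, then a quote-split pass, then a prefix-merge pass) into one scan whose single emit step splits and merges tokens inline as they are produced.
import Mathlib
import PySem

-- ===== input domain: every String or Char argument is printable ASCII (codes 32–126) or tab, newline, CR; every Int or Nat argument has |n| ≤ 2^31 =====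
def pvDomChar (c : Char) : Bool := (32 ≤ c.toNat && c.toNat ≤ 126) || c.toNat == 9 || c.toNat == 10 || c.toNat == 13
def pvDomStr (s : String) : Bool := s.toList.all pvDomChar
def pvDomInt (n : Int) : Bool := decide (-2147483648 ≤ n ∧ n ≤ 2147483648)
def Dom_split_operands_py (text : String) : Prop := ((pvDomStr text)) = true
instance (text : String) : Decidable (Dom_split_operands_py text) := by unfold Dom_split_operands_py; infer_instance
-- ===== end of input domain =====

-- B fuses A's three passes (character scan, quote-split pass, prefix-merge pass) into
-- one scan whose emit step splits and merges tokens inline; same return value.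

-- ===== PORT A =====
-- current[-1].isalnum() or current[-1] in ("-","_")  (exact on the ASCII domain)
def pvIsWordTail (c : Char) : Bool := c.isAlphanum || c = '-' || c = '_'

-- one iteration of A's main for-loop; state = (tokens, current, in_quote, paren_depth)
def pvStepA (s : List (List Char) × List Char × Option Char × Int) (ch : Char) :
    List (List Char) × List Char × Option Char × Int :=
  match s with
  | (tokens, current, inq, depth) =>
    match inq with
    | some qc =>
      if ch = qc then (tokens, current ++ [ch], none, depth)
      else (tokens, current ++ [ch], some qc, depth)
    | none =>
      if ch = '"' ∨ ch = '\'' then (tokens, current ++ [ch], some ch, depth)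
      else if ch = ' ' ∨ ch = '\t' then
        if depth > 0 then (tokens, current ++ [ch], none, depth)
        else if current ≠ [] then (tokens ++ [current], [], none, depth)
        else (tokens, current, none, depth)
      else if ch = '(' then
        if depth > 0 then (tokens, current ++ [ch], none, depth + 1)
        else if current ≠ [] ∧ pvIsWordTail (current.getLastD ' ') then
          (tokens, current ++ [ch], none, depth + 1)
        else ((if current ≠ [] then tokens ++ [current] else tokens) ++ [[ch]], [], none, depth)
      else if ch = ')' then
        if depth > 0 then (tokens, current ++ [ch], none, depth - 1)
        else ((if current ≠ [] then tokens ++ [current] else tokens) ++ [[ch]], [], none, depth)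
      else (tokens, current ++ [ch], none, depth)

-- body of A's first post-processing loop: the pieces appended to `fixed` for one token
def pvSplitTok (tok : List Char) : List (List Char) :=
  if 2 < tok.length ∧ (tok.headD ' ' = '"' ∨ tok.headD ' ' = '\'') ∧ tok.headD ' ' ∈ tok.tail then
    let closeIdx := tok.tail.idxOf (tok.headD ' ') + 1
    if closeIdx < tok.length - 1 then
      (tok.take (closeIdx + 1)) ::
        (if tok.drop (closeIdx + 1) ≠ [] then [tok.drop (closeIdx + 1)] else [])
    else [tok]
  else [tok]

-- body of A's second post-processing loop
def pvMergeStep (merged : List (List Char)) (tok : List Char) : List (List Char) :=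
  if merged ≠ [] ∧ (merged.getLastD []).length = 1 ∧
      ((merged.getLastD []).headD ' ').toUpper ∈ (['X', 'B', 'Z', 'N', 'H'] : List Char) ∧
      tok ≠ [] ∧ (tok.headD ' ' = '"' ∨ tok.headD ' ' = '\'') then
    merged.dropLast ++ [merged.getLastD [] ++ tok]
  else merged ++ [tok]

def split_operands_py (text : String) : List String :=
  let st := text.toList.foldl pvStepA ([], [], none, 0)
  let tokens := if st.2.1 ≠ [] then st.1 ++ [st.2.1] else st.1
  let fixed := tokens.foldl (fun acc tok => acc ++ pvSplitTok tok) []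
  let merged := fixed.foldl pvMergeStep []
  merged.map (fun t => String.ofList t)

-- ===== PORT B =====
-- B's `pieces` helper: str.find(q, 1) ported as -1 when absent
def pvPieces (tok : List Char) : List (List Char) :=
  match tok with
  | [] => [[]]
  | q :: rest =>
    if q = '"' ∨ q = '\'' then
      let i : Int := if q ∈ rest then (rest.idxOf q : Int) + 1 else -1
      if 1 ≤ i ∧ i < (tok.length : Int) - 1 then
        [tok.take (i.toNat + 1), tok.drop (i.toNat + 1)]
      else [tok]
    else [tok]

-- one merge-or-append step of B's `emit`
def pvMergeB (out : List (List Char)) (piece : List Char) : List (List Char) :=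
  match out.getLast?, piece with
  | some [p], q :: _ =>
    if p.toUpper ∈ (['X', 'B', 'Z', 'N', 'H'] : List Char) ∧ (q = '"' ∨ q = '\'') then
      out.dropLast ++ [p :: piece]
    else out ++ [piece]
  | _, _ => out ++ [piece]

-- B's `emit`
def pvEmit (out : List (List Char)) (tok : List Char) : List (List Char) :=
  (pvPieces tok).foldl pvMergeB out

def pvIsWordTailB (c : Char) : Bool := c.isAlphanum || c = '-' || c = '_'

-- B's single fused scan
def pvScanB : List Char → List (List Char) → List Char → Option Char → Int → List (List Char)
  | [], out, current, _inq, _d => if current ≠ [] then pvEmit out current else out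
  | ch :: cs, out, current, inq, d =>
    match inq with
    | some qc =>
      if ch = qc then pvScanB cs out (current ++ [ch]) none d
      else pvScanB cs out (current ++ [ch]) (some qc) d
    | none =>
      if ch = '"' ∨ ch = '\'' then pvScanB cs out (current ++ [ch]) (some ch) d
      else if ch = ' ' ∨ ch = '\t' then
        if d > 0 then pvScanB cs out (current ++ [ch]) none d
        else if current ≠ [] then pvScanB cs (pvEmit out current) [] none d
        else pvScanB cs out current none d
      else if ch = '(' then
        if d > 0 ∨ (current ≠ [] ∧ pvIsWordTailB (current.getLastD ' ')) then
          pvScanB cs out (current ++ [ch]) none (d + 1)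
        else pvScanB cs (pvEmit (if current ≠ [] then pvEmit out current else out) [ch]) [] none d
      else if ch = ')' then
        if d > 0 then pvScanB cs out (current ++ [ch]) none (d - 1)
        else pvScanB cs (pvEmit (if current ≠ [] then pvEmit out current else out) [ch]) [] none d
      else pvScanB cs out (current ++ [ch]) none d

def split_operands_py_alt (text : String) : List String :=
  (pvScanB text.toList [] [] none 0).map (fun t => String.ofList t)

-- ===== PRECONDITION & SPEC =====
def Spec_split_operands_py (text : String) (out : List String) : Prop := out = split_operands_py_alt text
instance (text : String) (out : List String) : Decidable (Spec_split_operands_py text out) := by unfold Spec_split_operands_py; infer_instance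

-- ===== CLAIM (what is proved, stated in full; the proofs are below) =====
def Claim_equal_split_operands_py : Prop := ∀ (text : String), Dom_split_operands_py text → Spec_split_operands_py text (split_operands_py text)

-- ===== LEMMAS AND PROOFS =====

-- B's piece-splitting agrees with the body of A's quote-split pass
theorem pvPieces_eq (tok : List Char) : pvPieces tok = pvSplitTok tok := by
  cases tok with
  | nil => simp [pvPieces, pvSplitTok]
  | cons q rest =>
    simp only [pvPieces, pvSplitTok, List.headD_cons, List.tail_cons, List.length_cons]
    by_cases hq : q = '"' ∨ q = '\''
    case neg => simp [hq]
    case pos =>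
      simp only [hq, if_true, true_and]
      by_cases hm : q ∈ rest
      case neg =>
        have c1 : ¬((1:Int) ≤ -1 ∧ (-1:Int) < (((rest.length+1 : Nat)):Int)-1) := by omega
        simp [hm, c1]
      case pos =>
        have hidx := List.idxOf_lt_length_of_mem hm
        simp only [hm, if_true, and_true]
        by_cases hlt : rest.idxOf q + 1 < rest.length
        · have c1 : (1:Int) ≤ (rest.idxOf q:Int)+1 ∧ (rest.idxOf q:Int)+1 < (((rest.length+1 : Nat)):Int)-1 := by
            push_cast; omega
          have htn : ((rest.idxOf q:Int)+1).toNat = rest.idxOf q + 1 := by omega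
          rw [if_pos c1, if_pos (by omega : 2 < rest.length + 1),
              if_pos (by omega : rest.idxOf q + 1 < rest.length + 1 - 1),
              if_pos (by simp [List.drop_eq_nil_iff]; omega :
                (q :: rest).drop (rest.idxOf q + 1 + 1) ≠ [])]
          simp [htn]
        · have c1 : ¬((1:Int) ≤ (rest.idxOf q:Int)+1 ∧ (rest.idxOf q:Int)+1 < (((rest.length+1 : Nat)):Int)-1) := by
            push_cast; omega
          rw [if_neg c1]
          split_ifs <;> first | rfl | omega

-- B's merge-or-append step agrees with the body of A's prefix-merge pass
theorem pvMergeB_eq (out : List (List Char)) (tok : List Char) :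
    pvMergeB out tok = pvMergeStep out tok := by
  rcases List.eq_nil_or_concat out with h | ⟨init, last, h⟩ <;> subst h
  · cases tok <;> simp [pvMergeB, pvMergeStep]
  · cases tok with
    | nil =>
      cases last with
      | nil => simp [pvMergeB, pvMergeStep]
      | cons p ps => cases ps <;> simp [pvMergeB, pvMergeStep]
    | cons q qs =>
      cases last with
      | nil => simp [pvMergeB, pvMergeStep]
      | cons p ps =>
        cases ps with
        | nil =>
          simp only [pvMergeB, pvMergeStep, List.getLast?_concat, List.getLastD_concat,
            List.dropLast_concat, List.headD_cons, List.length_cons, List.length_nil]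
          split_ifs <;> simp_all
        | cons p2 ps2 =>
          simp [pvMergeB, pvMergeStep, List.getLast?_concat, List.getLastD_concat]

theorem pvEmit_eq (out : List (List Char)) (tok : List Char) :
    pvEmit out tok = (pvSplitTok tok).foldl pvMergeStep out := by
  have hfun : pvMergeB = pvMergeStep := funext fun a => funext fun b => pvMergeB_eq a b
  rw [pvEmit, pvPieces_eq, hfun]

-- fusing A's two post-processing folds into a single fold of pvEmit
theorem post_fused (toks : List (List Char)) (accF : List (List Char)) (i : List (List Char)) :
    (toks.foldl (fun acc tok => acc ++ pvSplitTok tok) accF).foldl pvMergeStep i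
      = toks.foldl pvEmit (accF.foldl pvMergeStep i) := by
  induction toks generalizing accF with
  | nil => rfl
  | cons t ts ih =>
    simp only [List.foldl_cons]
    rw [ih (accF ++ pvSplitTok t), List.foldl_append, ← pvEmit_eq]

-- main fusion invariant: B's scan tracks A's scan with the fused emit
theorem scan_fused (cs : List Char) (toks : List (List Char)) (cur : List Char)
    (inq : Option Char) (d : Int) :
    pvScanB cs (toks.foldl pvEmit []) cur inq d
      = (let st := cs.foldl pvStepA (toks, cur, inq, d)
         (if st.2.1 ≠ [] then st.1 ++ [st.2.1] else st.1)).foldl pvEmit [] := by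
  induction cs generalizing toks cur inq d with
  | nil =>
    simp only [pvScanB, List.foldl_nil]
    by_cases hc : cur ≠ [] <;> simp [hc, List.foldl_append]
  | cons ch cs ih =>
    cases inq with
    | some qc =>
      simp only [pvScanB, List.foldl_cons, pvStepA]
      by_cases h : ch = qc
      · rw [if_pos h, if_pos h]; exact ih toks (cur ++ [ch]) none d
      · rw [if_neg h, if_neg h]; exact ih toks (cur ++ [ch]) (some qc) d
    | none =>
      simp only [pvScanB, List.foldl_cons, pvStepA]
      by_cases h1 : ch = '"' ∨ ch = '\''
      · rw [if_pos h1, if_pos h1]; exact ih toks (cur ++ [ch]) (some ch) d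
      · rw [if_neg h1, if_neg h1]
        by_cases h2 : ch = ' ' ∨ ch = '\t'
        · rw [if_pos h2, if_pos h2]
          by_cases hd : d > 0
          · rw [if_pos hd, if_pos hd]; exact ih toks (cur ++ [ch]) none d
          · rw [if_neg hd, if_neg hd]
            by_cases hc : cur ≠ []
            · rw [if_pos hc, if_pos hc]
              have : pvEmit (toks.foldl pvEmit []) cur = (toks ++ [cur]).foldl pvEmit [] := by
                simp [List.foldl_append]
              rw [this]; exact ih (toks ++ [cur]) [] none d
            · rw [if_neg hc, if_neg hc]; exact ih toks cur none d
        · rw [if_neg h2, if_neg h2]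
          by_cases h3 : ch = '('
          · rw [if_pos h3, if_pos h3]
            simp only [pvIsWordTailB, pvIsWordTail]
            by_cases hd : d > 0
            · rw [if_pos (Or.inl hd), if_pos hd]; exact ih toks (cur ++ [ch]) none (d + 1)
            · rw [if_neg hd]
              by_cases hw : cur ≠ [] ∧ ((cur.getLastD ' ').isAlphanum || decide (cur.getLastD ' ' = '-') || decide (cur.getLastD ' ' = '_')) = true
              · rw [if_pos (Or.inr hw), if_pos hw]; exact ih toks (cur ++ [ch]) none (d + 1)
              · rw [if_neg (by tauto : ¬(d > 0 ∨ (cur ≠ [] ∧ ((cur.getLastD ' ').isAlphanum || decide (cur.getLastD ' ' = '-') || decide (cur.getLastD ' ' = '_')) = true))), if_neg hw]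
                have : pvEmit (if cur ≠ [] then pvEmit (toks.foldl pvEmit []) cur else toks.foldl pvEmit []) [ch]
                    = ((if cur ≠ [] then toks ++ [cur] else toks) ++ [[ch]]).foldl pvEmit [] := by
                  by_cases hc : cur ≠ [] <;> simp [hc, List.foldl_append]
                rw [this]; exact ih _ [] none d
          · rw [if_neg h3, if_neg h3]
            by_cases h4 : ch = ')'
            · rw [if_pos h4, if_pos h4]
              by_cases hd : d > 0
              · rw [if_pos hd, if_pos hd]; exact ih toks (cur ++ [ch]) none (d - 1)
              · rw [if_neg hd, if_neg hd]
                have : pvEmit (if cur ≠ [] then pvEmit (toks.foldl pvEmit []) cur else toks.foldl pvEmit []) [ch]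
                    = ((if cur ≠ [] then toks ++ [cur] else toks) ++ [[ch]]).foldl pvEmit [] := by
                  by_cases hc : cur ≠ [] <;> simp [hc, List.foldl_append]
                rw [this]; exact ih _ [] none d
            · rw [if_neg h4, if_neg h4]; exact ih toks (cur ++ [ch]) none d

-- ===== VERDICT (by name: the statement is the Claim_ definition above) =====
theorem split_operands_py_spec : Claim_equal_split_operands_py := by
  intro text _
  unfold Spec_split_operands_py
  show split_operands_py text = split_operands_py_alt text
  have h := scan_fused text.toList [] [] none 0
  simp only [List.foldl_nil] at h
  simp only [split_operands_py, split_operands_py_alt, h, post_fused, List.foldl_nil]
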